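-- pv_equiv track=rewrite | github.com/polonecmichal/uloha7 | stvorec/stvorec.py | stvorec
-- ===== SOURCE A (Python) =====
-- def stvorec(n:int, znak:str) ->  str:
--     vystup = ""
--     for i in range(0,n):
--         if i==0 or i==n-1:
--             vystup += znak* n
--             vystup += "\n"
--         else:
--             vystup += znak + " "*(n-2) + znak
--             vystup += "\n"
--     return vystup
-- ===== SOURCE B (Python) =====
-- def stvorec(n: int, znak: str) -> str:
--     if n <= 0:
--         return ""
--     top = znak * n + "\n"
--     if n == 1:
--         return top
--     mid = znak + " " * (n - 2) + znak + "\n"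
--     return top + mid * (n - 2) + top
-- ===== Notes on version B (the rewrite author's own statement) =====
-- stated objective: simpler
-- what changed: Replaces the row-by-row loop with per-row branching by building the border row and the middle-row template once and assembling the square as top + mid*(n-2) + top, with degenerate sizes n<=0 and n==1 handled up front.
import Mathlib
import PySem

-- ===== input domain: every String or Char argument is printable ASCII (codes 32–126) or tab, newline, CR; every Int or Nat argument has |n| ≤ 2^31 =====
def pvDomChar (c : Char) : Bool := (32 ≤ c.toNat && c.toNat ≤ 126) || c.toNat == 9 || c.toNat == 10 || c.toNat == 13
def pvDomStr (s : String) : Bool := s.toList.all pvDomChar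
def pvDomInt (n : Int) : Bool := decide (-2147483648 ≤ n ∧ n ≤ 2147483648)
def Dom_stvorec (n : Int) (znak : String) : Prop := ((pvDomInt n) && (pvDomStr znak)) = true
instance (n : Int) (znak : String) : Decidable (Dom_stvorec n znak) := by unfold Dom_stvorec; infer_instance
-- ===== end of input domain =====

-- B builds the square from replicated row templates (top + mid*(n-2) + top) instead of A's
-- row-by-row loop with a per-row branch; objective: simpler. Equivalence of return values is proved.

-- ===== PORT A =====
-- Literal port of A: fold over range(0, n), appending a border row when i == 0 or i == n-1,
-- else a middle row. Strings are handled on the List Char side (String.ofList at the end).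
def stvorecChars (n : Int) (zs : List Char) : List Char :=
  (PySem.List.pyRange 0 n 1).foldl
    (fun v i =>
      if i = 0 ∨ i = n - 1 then
        (v ++ PySem.List.pyRepeat zs n) ++ ['\n']
      else
        (v ++ (zs ++ PySem.List.pyRepeat [' '] (n - 2) ++ zs)) ++ ['\n'])
    []

def stvorec (n : Int) (znak : String) : String := String.ofList (stvorecChars n znak.toList)

-- ===== PORT B =====
-- Literal port of Source B: "" for n <= 0, the single border row for n == 1, otherwise
-- top ++ mid*(n-2) ++ top built from the two row templates.
def stvorecAltChars (n : Int) (zs : List Char) : List Char :=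
  if n ≤ 0 then []
  else
    let top := PySem.List.pyRepeat zs n ++ ['\n']
    if n = 1 then top
    else
      let mid := zs ++ PySem.List.pyRepeat [' '] (n - 2) ++ zs ++ ['\n']
      top ++ PySem.List.pyRepeat mid (n - 2) ++ top

def stvorec_alt (n : Int) (znak : String) : String := String.ofList (stvorecAltChars n znak.toList)

-- ===== PRECONDITION & SPEC =====
def Spec_stvorec (n : Int) (znak : String) (out : String) : Prop := out = stvorec_alt n znak
instance (n : Int) (znak : String) (out : String) : Decidable (Spec_stvorec n znak out) := by unfold Spec_stvorec; infer_instance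

-- ===== CLAIM (what is proved, stated in full; the proofs are below) =====
def Claim_equal_stvorec : Prop := ∀ (n : Int) (znak : String), Dom_stvorec n znak → Spec_stvorec n znak (stvorec n znak)

-- ===== LEMMAS AND PROOFS =====

-- one more copy of a repeated block, appended at the right
theorem flatten_replicate_succ {α : Type} (k : Nat) (x : List α) :
    (List.replicate (k + 1) x).flatten = (List.replicate k x).flatten ++ x := by
  rw [List.replicate_succ' (n := k), List.flatten_append]
  simp

-- the first k+1 rows: one top row then k middle rows
theorem flatMap_range_if_zero {α : Type} (k : Nat) (top mid : List α) :
    (List.range (k + 1)).flatMap (fun j => if j = 0 then top else mid)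
      = top ++ (List.replicate k mid).flatten := by
  induction k with
  | zero => simp
  | succ k ih =>
    rw [List.range_succ, List.flatMap_append, ih, flatten_replicate_succ]
    simp

theorem stvorecChars_eq (n : Int) (zs : List Char) :
    stvorecChars n zs = stvorecAltChars n zs := by
  by_cases hn : n ≤ 0
  · have hr : PySem.List.pyRange 0 n 1 = [] := by
      simp [PySem.List.pyRange]; omega
    simp [stvorecChars, stvorecAltChars, hr, hn]
  · -- n ≥ 1; write n as a natural number m ≥ 1
    obtain ⟨m, rfl⟩ : ∃ m : Nat, n = (m : Int) := ⟨n.toNat, by omega⟩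
    -- the loop body appends one row per iteration
    have hbody :
        (fun (v : List Char) (i : Int) =>
          if i = 0 ∨ i = (m : Int) - 1 then
            (v ++ PySem.List.pyRepeat zs (m : Int)) ++ ['\n']
          else
            (v ++ (zs ++ PySem.List.pyRepeat [' '] ((m : Int) - 2) ++ zs)) ++ ['\n'])
        = (fun (v : List Char) (i : Int) =>
            v ++ (if i = 0 ∨ i = (m : Int) - 1 then
                    PySem.List.pyRepeat zs (m : Int) ++ ['\n']
                  else
                    zs ++ PySem.List.pyRepeat [' '] ((m : Int) - 2) ++ zs ++ ['\n'])) := by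
      funext v i
      split <;> simp
    have hfold :
        stvorecChars (m : Int) zs
          = (List.range m).flatMap
              (fun j => if ((j : Nat) : Int) = 0 ∨ ((j : Nat) : Int) = (m : Int) - 1 then
                  PySem.List.pyRepeat zs (m : Int) ++ ['\n']
                else
                  zs ++ PySem.List.pyRepeat [' '] ((m : Int) - 2) ++ zs ++ ['\n']) := by
      rw [stvorecChars, hbody, PySem.List.foldl_append_eq_flatMap,
        PySem.List.pyRange_zero_natCast, List.flatMap_map, List.nil_append]
    rcases Nat.lt_or_ge m 2 with h2 | h2
    · -- m = 1: a single border row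
      have hm1 : m = 1 := by omega
      subst hm1
      rw [hfold]
      have h1 : ¬ ((1 : Nat) : Int) ≤ 0 := by norm_num
      simp [stvorecAltChars, List.range_succ]
    · -- m ≥ 2: m = k + 2, one top row, k middle rows, one top row
      obtain ⟨k, rfl⟩ : ∃ k : Nat, m = k + 2 := ⟨m - 2, by omega⟩
      rw [hfold, List.range_succ, List.flatMap_append]
      have hfirst :
          (List.range (k + 1)).flatMap
              (fun j => if ((j : Nat) : Int) = 0 ∨ ((j : Nat) : Int) = ((k + 2 : Nat) : Int) - 1 then
                  PySem.List.pyRepeat zs ((k + 2 : Nat) : Int) ++ ['\n']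
                else
                  zs ++ PySem.List.pyRepeat [' '] (((k + 2 : Nat) : Int) - 2) ++ zs ++ ['\n'])
            = (List.range (k + 1)).flatMap
                (fun j => if j = 0 then
                    PySem.List.pyRepeat zs ((k + 2 : Nat) : Int) ++ ['\n']
                  else
                    zs ++ PySem.List.pyRepeat [' '] (((k + 2 : Nat) : Int) - 2) ++ zs ++ ['\n']) := by
        rw [List.flatMap, List.flatMap, List.map_congr_left]
        intro j hj
        have hj' : j < k + 1 := List.mem_range.mp hj
        by_cases h0 : j = 0
        · simp [h0]
        · simp only [h0, if_false]
          simp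
          intro h
          exfalso
          omega
      rw [hfirst, flatMap_range_if_zero]
      have hlastrow : ((k + 1 : Nat) : Int) = ((k + 2 : Nat) : Int) - 1 := by push_cast; ring
      have hrep : PySem.List.pyRepeat
            (zs ++ PySem.List.pyRepeat [' '] (((k + 2 : Nat) : Int) - 2) ++ zs ++ ['\n'])
            (((k + 2 : Nat) : Int) - 2)
          = (List.replicate k
              (zs ++ PySem.List.pyRepeat [' '] (((k + 2 : Nat) : Int) - 2) ++ zs ++ ['\n'])).flatten := by
        simp [PySem.List.pyRepeat]
      have h1 : ¬ ((k + 2 : Nat) : Int) ≤ 0 := by push_cast; omega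
      have h2' : ¬ ((k + 2 : Nat) : Int) = 1 := by push_cast; omega
      rw [stvorecAltChars]
      simp only [h1, h2', if_false, hrep]
      simp [List.append_assoc]
      intro h
      exfalso
      omega

-- ===== VERDICT (by name: the statement is the Claim_ definition above) =====
theorem stvorec_spec : Claim_equal_stvorec := by
  intro n znak _
  unfold Spec_stvorec
  rw [stvorec, stvorec_alt, stvorecChars_eq]
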